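-- pv_equiv track=rewrite | github.com/HIX4123/PusanNU | 1-1/CB1501007/Computer and Programming Entry/Python 2023 실습코드/3200 Function Apply 1(b)/400 - 함수의 다양한 2(c)/Func_Apply -0200- 남여 어린이 줄 나누기 (2).py | sexsplit
-- ===== SOURCE A (Python) =====
-- def sexsplit( L ) :
--     Male  =[]
--     Female=[]
--     Child =[]   # Male=Child=Female=[]
--     for w in L :
--         rsex = w//10000
--         if rsex == 2 : Female.append( w )
--         if rsex == 1 :   Male.append( w )
--         if rsex == 3 :   Child.append( w )
--     return( Male, Female, Child )
-- ===== SOURCE B (Python) =====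
-- def sexsplit(L):
--     # Stable sort by group key, then cut the sorted list at the two group
--     # boundaries found by linear scans.  Stability of sorted() preserves the
--     # original order inside each group; keys other than 1/2/3 are dropped.
--     kept = sorted([w for w in L if 1 <= w // 10000 <= 3], key=lambda w: w // 10000)
--     i = 0
--     while i < len(kept) and kept[i] // 10000 == 1:
--         i += 1
--     j = i
--     while j < len(kept) and kept[j] // 10000 == 2:
--         j += 1
--     return (kept[:i], kept[i:j], kept[j:])
-- ===== Notes on version B (the rewrite author's own statement) =====
-- stated objective: alternative
-- what changed: Replaced A's single conditional-append loop by a sort-then-cut algorithm: stable-sort the kept elements by the group key w//10000, find the two group boundaries by linear scans, and slice the sorted list into the three groups (stability preserves per-group input order).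
import Mathlib
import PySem

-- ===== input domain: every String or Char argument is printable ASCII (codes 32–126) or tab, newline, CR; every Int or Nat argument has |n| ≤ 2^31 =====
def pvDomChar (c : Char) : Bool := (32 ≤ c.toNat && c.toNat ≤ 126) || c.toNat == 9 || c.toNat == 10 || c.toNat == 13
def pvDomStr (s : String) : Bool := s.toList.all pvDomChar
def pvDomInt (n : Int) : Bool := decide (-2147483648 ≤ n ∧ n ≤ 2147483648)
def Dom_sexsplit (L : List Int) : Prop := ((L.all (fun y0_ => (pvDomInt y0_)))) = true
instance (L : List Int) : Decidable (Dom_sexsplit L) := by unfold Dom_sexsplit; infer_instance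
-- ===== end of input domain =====

-- B replaces A's single conditional-append pass by a stable sort on the group key followed by
-- boundary scans and slicing; a genuinely different (sort-then-cut) algorithm, objective: alternative.


-- ===== PORT A =====
-- one pass: for each w, compute rsex = w//10000 and append to the matching accumulator
def sexsplit (L : List Int) : List Int × List Int × List Int :=
  let r := L.foldl (fun (st : List Int × List Int × List Int) w =>
    let (m, f, c) := st
    let rsex := PySem.Int.floordiv w 10000
    let f := if rsex == 2 then f ++ [w] else f
    let m := if rsex == 1 then m ++ [w] else m
    let c := if rsex == 3 then c ++ [w] else c
    (m, f, c)) ([], [], [])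
  r

-- ===== PORT B =====
-- transcription of Source B's index while-loop 'while i < len(kept) and kept[i]//10000 == k: i += 1'
-- (started at the position the remaining list represents): counts the leading elements with key k
def pvScanEq (k : Int) : List Int → Nat
  | [] => 0
  | w :: ws => if PySem.Int.floordiv w 10000 == k then pvScanEq k ws + 1 else 0

-- stable sort of the kept elements by key, then cut at the two boundaries found by the scans
def sexsplit_alt (L : List Int) : List Int × List Int × List Int :=
  let kept := PySem.List.sorted
    (L.filter (fun w => decide (1 ≤ PySem.Int.floordiv w 10000 ∧ PySem.Int.floordiv w 10000 ≤ 3)))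
    (fun w => PySem.Int.floordiv w 10000)
  let i := pvScanEq 1 kept
  let j := i + pvScanEq 2 (kept.drop i)
  (PySem.List.slice kept none (some (i : Int)),
   PySem.List.slice kept (some (i : Int)) (some (j : Int)),
   PySem.List.slice kept (some (j : Int)) none)

-- ===== PRECONDITION & SPEC =====
def Spec_sexsplit (L : List Int) (out : List Int × List Int × List Int) : Prop := out = sexsplit_alt L
instance (L : List Int) (out : List Int × List Int × List Int) : Decidable (Spec_sexsplit L out) := by unfold Spec_sexsplit; infer_instance

-- ===== CLAIM (what is proved, stated in full; the proofs are below) =====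
def Claim_equal_sexsplit : Prop := ∀ (L : List Int), Dom_sexsplit L → Spec_sexsplit L (sexsplit L)

-- ===== LEMMAS AND PROOFS =====

-- the group key
def pvKey (w : Int) : Int := PySem.Int.floordiv w 10000

-- the group-k filter of L, in input order
def pvF (k : Int) (L : List Int) : List Int := L.filter (fun w => pvKey w == k)

lemma mem_pvF {k : Int} {L : List Int} {y : Int} (h : y ∈ pvF k L) : pvKey y = k := by
  unfold pvF at h
  simpa using (List.mem_filter.mp h).2

lemma insertBy_append_not {α : Type} (b : α → α → Bool) (x : α) (l r : List α)
    (h : ∀ z ∈ l, b x z = false) :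
    PySem.List.insertBy b x (l ++ r) = l ++ PySem.List.insertBy b x r := by
  induction l with
  | nil => simp
  | cons z l ih =>
    have hz : b x z = false := h z (by simp)
    simp only [List.cons_append, PySem.List.insertBy, hz]
    simp [ih (fun z hz' => h z (by simp [hz']))]

lemma insertBy_all_before {α : Type} (b : α → α → Bool) (x : α) (ys : List α)
    (h : ∀ y ∈ ys, b x y = true) :
    PySem.List.insertBy b x ys = x :: ys := by
  cases ys with
  | nil => simp [PySem.List.insertBy]
  | cons y ys => simp [PySem.List.insertBy, h y (by simp)]

-- A's loop invariant is standard; the heart of the file is instead stability of the sort: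
-- folding insertBy over a list whose keys are all in {1,2,3} extends the three blocks in order.
lemma foldl_ins (xs : List Int) (f1 f2 f3 : List Int)
    (h1 : ∀ y ∈ f1, pvKey y = 1) (h2 : ∀ y ∈ f2, pvKey y = 2) (h3 : ∀ y ∈ f3, pvKey y = 3)
    (hx : ∀ w ∈ xs, pvKey w = 1 ∨ pvKey w = 2 ∨ pvKey w = 3) :
    xs.foldl (fun acc x => PySem.List.insertBy (fun a b => decide (pvKey a < pvKey b)) x acc)
      (f1 ++ (f2 ++ f3))
    = (f1 ++ pvF 1 xs) ++ ((f2 ++ pvF 2 xs) ++ (f3 ++ pvF 3 xs)) := by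
  induction xs generalizing f1 f2 f3 with
  | nil => simp [pvF]
  | cons x xs ih =>
    have hk := hx x (by simp)
    have hx' : ∀ w ∈ xs, pvKey w = 1 ∨ pvKey w = 2 ∨ pvKey w = 3 :=
      fun w hw => hx w (by simp [hw])
    simp only [List.foldl_cons]
    rcases hk with hk | hk | hk
    · -- key 1: skip f1 (ties), insert before everything in f2 ++ f3
      rw [insertBy_append_not _ _ f1 (f2 ++ f3)
            (fun z hz => by simp [hk, h1 z hz]),
          insertBy_all_before _ _ (f2 ++ f3)
            (fun y hy => by
              rcases List.mem_append.mp hy with hy | hy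
              · simp [hk, h2 y hy]
              · simp [hk, h3 y hy])]
      have : f1 ++ x :: (f2 ++ f3) = (f1 ++ [x]) ++ (f2 ++ f3) := by simp
      rw [this, ih (f1 ++ [x]) f2 f3
            (fun y hy => by
              rcases List.mem_append.mp hy with hy | hy
              · exact h1 y hy
              · simp at hy; simp [hy, hk]) h2 h3 hx']
      simp [pvF, hk]
    · -- key 2: skip f1 and f2, insert before everything in f3
      have : f1 ++ (f2 ++ f3) = (f1 ++ f2) ++ f3 := by simp
      rw [this,
          insertBy_append_not _ _ (f1 ++ f2) f3
            (fun z hz => by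
              rcases List.mem_append.mp hz with hz | hz
              · simp [hk, h1 z hz]
              · simp [hk, h2 z hz]),
          insertBy_all_before _ _ f3 (fun y hy => by simp [hk, h3 y hy])]
      have h2' : f1 ++ f2 ++ x :: f3 = f1 ++ ((f2 ++ [x]) ++ f3) := by simp
      rw [h2', ih f1 (f2 ++ [x]) f3 h1
            (fun y hy => by
              rcases List.mem_append.mp hy with hy | hy
              · exact h2 y hy
              · simp at hy; simp [hy, hk]) h3 hx']
      simp [pvF, hk]
    · -- key 3: goes to the very end
      rw [PySem.List.insertBy_of_forall_not_before _ _ _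
            (fun z hz => by
              rcases List.mem_append.mp hz with hz | hz
              · simp [hk, h1 z hz]
              · rcases List.mem_append.mp hz with hz | hz
                · simp [hk, h2 z hz]
                · simp [hk, h3 z hz])]
      have : (f1 ++ (f2 ++ f3)) ++ [x] = f1 ++ (f2 ++ (f3 ++ [x])) := by simp
      rw [this, ih f1 f2 (f3 ++ [x]) h1 h2
            (fun y hy => by
              rcases List.mem_append.mp hy with hy | hy
              · exact h3 y hy
              · simp at hy; simp [hy, hk]) hx']
      simp [pvF, hk]

-- the stable sort of the kept elements is exactly the three filters in key order
lemma sorted_kept (L : List Int) :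
    PySem.List.sorted
      (L.filter (fun w => decide (1 ≤ PySem.Int.floordiv w 10000 ∧ PySem.Int.floordiv w 10000 ≤ 3)))
      (fun w => PySem.Int.floordiv w 10000)
    = pvF 1 L ++ (pvF 2 L ++ pvF 3 L) := by
  set p : Int → Bool := fun w => decide (1 ≤ PySem.Int.floordiv w 10000 ∧ PySem.Int.floordiv w 10000 ≤ 3) with hp
  have hkey : (fun w => PySem.Int.floordiv w 10000) = pvKey := by funext w; rfl
  rw [hkey, PySem.List.sorted_eq_foldl_insertBy]
  have hmem : ∀ w ∈ L.filter p, pvKey w = 1 ∨ pvKey w = 2 ∨ pvKey w = 3 := by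
    intro w hw
    have := (List.mem_filter.mp hw).2
    simp [hp, pvKey] at this ⊢
    omega
  have := foldl_ins (L.filter p) [] [] [] (by simp) (by simp) (by simp) hmem
  simp only [List.nil_append] at this
  rw [this]
  have hfk : ∀ k : Int, (1 ≤ k ∧ k ≤ 3) → pvF k (L.filter p) = pvF k L := by
    intro k hkr
    unfold pvF
    rw [List.filter_filter]
    refine List.filter_congr ?_
    intro w _
    by_cases h : pvKey w = k
    · simp [hp, pvKey]; omega
    · simp [h]
  rw [hfk 1 (by omega), hfk 2 (by omega), hfk 3 (by omega)]

lemma scan_all {k : Int} (l r : List Int) (h : ∀ y ∈ l, pvKey y = k) :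
    pvScanEq k (l ++ r) = l.length + pvScanEq k r := by
  induction l with
  | nil => simp
  | cons y l ih =>
    have hy : pvKey y = k := h y (by simp)
    simp only [List.cons_append, pvScanEq]
    have : PySem.Int.floordiv y 10000 == k := by simp [← hy, pvKey]
    rw [if_pos this, ih (fun z hz => h z (by simp [hz]))]
    simp only [List.length_cons]
    omega

lemma scan_zero {k : Int} (r : List Int) (h : ∀ y ∈ r, pvKey y ≠ k) :
    pvScanEq k r = 0 := by
  cases r with
  | nil => rfl
  | cons y r =>
    have hy := h y (by simp)
    simp only [pvScanEq]
    rw [if_neg (by simpa [pvKey] using hy)]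

-- ===== VERDICT (by name: the statement is the Claim_ definition above) =====
theorem sexsplit_spec : Claim_equal_sexsplit := by
  intro L _
  unfold Spec_sexsplit sexsplit sexsplit_alt
  -- A's side: standard accumulator invariant
  have ha : ∀ (M : List Int) (m f c : List Int),
      M.foldl (fun (st : List Int × List Int × List Int) w =>
        let (m, f, c) := st
        let rsex := PySem.Int.floordiv w 10000
        let f := if rsex == 2 then f ++ [w] else f
        let m := if rsex == 1 then m ++ [w] else m
        let c := if rsex == 3 then c ++ [w] else c
        (m, f, c)) (m, f, c)
      = (m ++ pvF 1 M, f ++ pvF 2 M, c ++ pvF 3 M) := by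
    intro M
    induction M with
    | nil => intro m f c; simp [pvF]
    | cons w M ih =>
      intro m f c
      simp only [List.foldl_cons]
      rw [ih]
      unfold pvF pvKey
      simp only [List.filter_cons]
      by_cases h1 : PySem.Int.floordiv w 10000 = 1 <;>
        by_cases h2 : PySem.Int.floordiv w 10000 = 2 <;>
          by_cases h3 : PySem.Int.floordiv w 10000 = 3 <;>
            simp_all
  -- B's side: rewrite the sorted list into the three blocks, then compute the cuts
  rw [sorted_kept]
  have hi : pvScanEq 1 (pvF 1 L ++ (pvF 2 L ++ pvF 3 L)) = (pvF 1 L).length := by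
    rw [scan_all _ _ (fun y hy => mem_pvF hy),
        scan_zero _ (fun y hy => by
          rcases List.mem_append.mp hy with hy | hy
          · simp [mem_pvF hy]
          · simp [mem_pvF hy])]
    omega
  have hdrop : (pvF 1 L ++ (pvF 2 L ++ pvF 3 L)).drop (pvF 1 L).length = pvF 2 L ++ pvF 3 L := by
    simp
  have hj : pvScanEq 2 (pvF 2 L ++ pvF 3 L) = (pvF 2 L).length := by
    rw [scan_all _ _ (fun y hy => mem_pvF hy),
        scan_zero _ (fun y hy => by simp [mem_pvF hy])]
    omega
  simp only [hi, hdrop, hj]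
  rw [ha L [] [] []]
  simp only [List.nil_append]
  refine Prod.ext ?_ (Prod.ext ?_ ?_)
  · rw [PySem.List.slice_to_natCast]
    simp
  · rw [PySem.List.slice_natCast]
    simp
  · rw [PySem.List.slice_from_natCast,
        show pvF 1 L ++ (pvF 2 L ++ pvF 3 L) = (pvF 1 L ++ pvF 2 L) ++ pvF 3 L by simp,
        show (pvF 1 L).length + (pvF 2 L).length = (pvF 1 L ++ pvF 2 L).length by simp]
    simp
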